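-- pv_equiv track=rewrite | github.com/LouieSu/CITS5206-Capstone-Group-5 | backend/api/validator/availability_and_prereq_checker.py | generate_semester_labels_fixed_year
-- ===== SOURCE A (Python) =====
-- def generate_semester_labels_fixed_year(starting_semester, num_semesters):
--     year = starting_semester[:2]  # e.g., "24"
--     start_sem = starting_semester[-2:].upper()  # "S1" or "S2"
--     sem_cycle = ["S1", "S2"]
--     start_index = sem_cycle.index(start_sem)
--
--     labels = []
--     for i in range(num_semesters):
--         current_index = (start_index + i) % 2
--         label = f"{year}{sem_cycle[current_index]}"
--         labels.append(label)
--     return labels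
-- ===== SOURCE B (Python) =====
-- def generate_semester_labels_fixed_year(starting_semester, num_semesters):
--     year = starting_semester[:2]
--     sem_cycle = ["S1", "S2"]
--     start_index = sem_cycle.index(starting_semester[-2:].upper())
--     first = year + sem_cycle[start_index]
--     second = year + sem_cycle[1 - start_index]
--     n = max(num_semesters, 0)
--     return ([first, second] * ((n + 1) // 2))[:n]
-- ===== Notes on version B (the rewrite author's own statement) =====
-- stated objective: idiomatic
-- what changed: Replaces the per-iteration loop computing (start_index+i)%2 and appending with forming the two labels once and producing the sequence by list tiling plus truncation ([first, second]*ceil(n/2))[:n].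
import Mathlib
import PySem

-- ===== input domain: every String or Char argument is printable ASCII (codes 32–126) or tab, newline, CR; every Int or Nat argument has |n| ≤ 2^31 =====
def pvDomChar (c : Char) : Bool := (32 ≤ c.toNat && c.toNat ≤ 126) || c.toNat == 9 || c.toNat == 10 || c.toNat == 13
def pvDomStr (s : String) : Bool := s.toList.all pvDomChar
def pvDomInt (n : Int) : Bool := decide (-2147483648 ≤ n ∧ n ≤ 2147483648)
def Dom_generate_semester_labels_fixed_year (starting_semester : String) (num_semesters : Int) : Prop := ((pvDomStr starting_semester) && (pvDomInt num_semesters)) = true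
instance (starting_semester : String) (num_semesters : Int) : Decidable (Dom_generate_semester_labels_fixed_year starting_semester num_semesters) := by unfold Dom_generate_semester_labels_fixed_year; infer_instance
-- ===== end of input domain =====

-- B builds the alternating label list by tiling [first, second] and truncating, instead of
-- computing a modular index per iteration; objective: more idiomatic, same cost.

-- ===== PORT A =====
def generate_semester_labels_fixed_year (starting_semester : String) (num_semesters : Int) : List String :=
  let year := PySem.Str.slice starting_semester none (some 2)
  let start_sem := PySem.Str.upper (PySem.Str.slice starting_semester (some (-2)) none)
  let sem_cycle := ["S1", "S2"]
  match PySem.List.index? sem_cycle start_sem with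
  | none => []   -- Python raises ValueError here; these inputs are excluded by Pre_
  | some start_index =>
    (PySem.List.pyRange 0 num_semesters 1).foldl (fun labels i =>
      let current_index := PySem.Int.mod ((start_index : Int) + i) 2
      let label := year ++ PySem.List.pyGetD sem_cycle current_index ""  -- index is always 0 or 1, in range
      labels ++ [label]) []

-- ===== PORT B =====
def generate_semester_labels_fixed_year_alt (starting_semester : String) (num_semesters : Int) : List String :=
  let year := PySem.Str.slice starting_semester none (some 2)
  let sem_cycle := ["S1", "S2"]
  match PySem.List.index? sem_cycle (PySem.Str.upper (PySem.Str.slice starting_semester (some (-2)) none)) with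
  | none => []   -- Python raises ValueError here; these inputs are excluded by Pre_
  | some start_index =>
    let first := year ++ PySem.List.pyGetD sem_cycle (start_index : Int) ""
    let second := year ++ PySem.List.pyGetD sem_cycle (1 - (start_index : Int)) ""
    let n := max num_semesters 0
    -- Python "[first, second] * k" with k = (n+1)//2 ≥ 0 is exactly flatten (replicate k [first, second])
    PySem.List.slice (List.flatten (List.replicate (PySem.Int.floordiv (n + 1) 2).toNat [first, second])) none (some n)

-- ===== PRECONDITION & SPEC =====
-- Pre_ excludes exactly the inputs whose uppercased last-two-character suffix is neither "S1" nor "S2",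
-- on which Python A raises ValueError from sem_cycle.index.
def Pre_generate_semester_labels_fixed_year (starting_semester : String) (num_semesters : Int) : Prop :=
  PySem.Str.upper (PySem.Str.slice starting_semester (some (-2)) none) = "S1" ∨
  PySem.Str.upper (PySem.Str.slice starting_semester (some (-2)) none) = "S2"
instance (starting_semester : String) (num_semesters : Int) : Decidable (Pre_generate_semester_labels_fixed_year starting_semester num_semesters) := by unfold Pre_generate_semester_labels_fixed_year; infer_instance
def pvWitness_generate_semester_labels_fixed_year : String × Int := ("24S1", 4)

def Spec_generate_semester_labels_fixed_year (starting_semester : String) (num_semesters : Int) (out : List String) : Prop := out = generate_semester_labels_fixed_year_alt starting_semester num_semesters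
instance (starting_semester : String) (num_semesters : Int) (out : List String) : Decidable (Spec_generate_semester_labels_fixed_year starting_semester num_semesters out) := by unfold Spec_generate_semester_labels_fixed_year; infer_instance

-- ===== CLAIM (what is proved, stated in full; the proofs are below) =====
def Claim_equal_generate_semester_labels_fixed_year : Prop := ∀ (starting_semester : String) (num_semesters : Int), Dom_generate_semester_labels_fixed_year starting_semester num_semesters → Pre_generate_semester_labels_fixed_year starting_semester num_semesters → Spec_generate_semester_labels_fixed_year starting_semester num_semesters (generate_semester_labels_fixed_year starting_semester num_semesters)

-- ===== LEMMAS AND PROOFS =====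

-- An alternating map over a range is the tiled two-element list truncated.
lemma pv_alt_tile (a b : String) : ∀ t : Nat,
    (List.range t).map (fun k => if k % 2 = 0 then a else b)
      = (List.flatten (List.replicate ((t + 1) / 2) [a, b])).take t := by
  intro t
  induction t using Nat.twoStepInduction with
  | zero => rfl
  | one => rfl
  | more t ih _ =>
    have hfun : (((fun k : Nat => if k % 2 = 0 then a else b) ∘ Nat.succ) ∘ Nat.succ)
        = (fun k : Nat => if k % 2 = 0 then a else b) := by
      funext k
      have h2 : (k + 2) % 2 = k % 2 := by omega
      simp [Function.comp_def, Nat.succ_eq_add_one, show k + 1 + 1 = k + 2 from rfl, h2]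
    rw [show (t + 2 + 1) / 2 = (t + 1) / 2 + 1 by omega, List.replicate_succ, List.flatten_cons,
        List.range_succ_eq_map, List.range_succ_eq_map, List.map_cons, List.map_map, List.map_cons,
        List.map_map, hfun, ih]
    simp

-- The two ports agree when the suffix is "S1" (start_index = 0).
lemma pv_case_S1 (s : String) (n : Int)
    (h : PySem.Str.upper (PySem.Str.slice s (some (-2)) none) = "S1") :
    generate_semester_labels_fixed_year s n = generate_semester_labels_fixed_year_alt s n := by
  unfold generate_semester_labels_fixed_year generate_semester_labels_fixed_year_alt
  rw [h]
  simp only [show PySem.List.index? ["S1", "S2"] "S1" = some 0 from rfl]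
  rw [PySem.List.foldl_append_singleton_eq_map, PySem.List.pyRange_one]
  rw [← Int.toNat_eq_max]
  have hfd : PySem.Int.floordiv ((n.toNat : Int) + 1) 2 = ((n.toNat + 1) / 2 : Nat) := by
    rw [show ((n.toNat : Int) + 1) = ((n.toNat + 1 : Nat) : Int) by push_cast; ring]
    exact_mod_cast PySem.Int.floordiv_natCast (n.toNat + 1) 2
  rw [hfd, Int.toNat_natCast, PySem.List.slice_to_natCast]
  rw [List.nil_append, List.map_map, Int.sub_zero]
  rw [show (PySem.List.pyGetD ["S1", "S2"] ((0:Nat) : Int) "") = "S1" from rfl,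
      show (PySem.List.pyGetD ["S1", "S2"] (1 - ((0:Nat) : Int)) "") = "S2" from rfl]
  rw [← pv_alt_tile]
  apply List.map_congr_left
  intro k _
  have hmod : PySem.Int.mod (((0:Nat) : Int) + (0 + (k : Int))) 2 = ((k % 2 : Nat) : Int) := by
    rw [show (((0:Nat) : Int) + (0 + (k : Int))) = ((k : Nat) : Int) by push_cast; ring]
    exact_mod_cast PySem.Int.mod_natCast k 2
  simp only [Function.comp_def, hmod]
  rcases Nat.mod_two_eq_zero_or_one k with hk | hk <;> simp [hk] <;> rfl

-- The two ports agree when the suffix is "S2" (start_index = 1).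
lemma pv_case_S2 (s : String) (n : Int)
    (h : PySem.Str.upper (PySem.Str.slice s (some (-2)) none) = "S2") :
    generate_semester_labels_fixed_year s n = generate_semester_labels_fixed_year_alt s n := by
  unfold generate_semester_labels_fixed_year generate_semester_labels_fixed_year_alt
  rw [h]
  simp only [show PySem.List.index? ["S1", "S2"] "S2" = some 1 from rfl]
  rw [PySem.List.foldl_append_singleton_eq_map, PySem.List.pyRange_one]
  rw [← Int.toNat_eq_max]
  have hfd : PySem.Int.floordiv ((n.toNat : Int) + 1) 2 = ((n.toNat + 1) / 2 : Nat) := by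
    rw [show ((n.toNat : Int) + 1) = ((n.toNat + 1 : Nat) : Int) by push_cast; ring]
    exact_mod_cast PySem.Int.floordiv_natCast (n.toNat + 1) 2
  rw [hfd, Int.toNat_natCast, PySem.List.slice_to_natCast]
  rw [List.nil_append, List.map_map, Int.sub_zero]
  rw [show (PySem.List.pyGetD ["S1", "S2"] ((1:Nat) : Int) "") = "S2" from rfl,
      show (PySem.List.pyGetD ["S1", "S2"] (1 - ((1:Nat) : Int)) "") = "S1" from rfl]
  rw [← pv_alt_tile]
  apply List.map_congr_left
  intro k _
  have hmod : PySem.Int.mod (((1:Nat) : Int) + (0 + (k : Int))) 2 = (((1 + k) % 2 : Nat) : Int) := by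
    rw [show (((1:Nat) : Int) + (0 + (k : Int))) = ((1 + k : Nat) : Int) by push_cast; ring]
    exact_mod_cast PySem.Int.mod_natCast (1 + k) 2
  simp only [Function.comp_def, hmod]
  rcases Nat.mod_two_eq_zero_or_one k with hk | hk <;>
    simp [hk, show (1 + k) % 2 = 1 - k % 2 by omega] <;> rfl

-- ===== VERDICT (by name: the statement is the Claim_ definition above) =====
theorem generate_semester_labels_fixed_year_spec : Claim_equal_generate_semester_labels_fixed_year := by
  intro s n _ hpre
  unfold Spec_generate_semester_labels_fixed_year
  rcases hpre with h | h
  · exact pv_case_S1 s n h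
  · exact pv_case_S2 s n h
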